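-- pv_equiv track=rewrite | github.com/WCARL12/Encryption | cipher.py | apply_decipher_depth_1
-- ===== SOURCE A (Python) =====
-- def apply_decipher_depth_1(cipher_text, length_column):
--     decipher_2d_list = []
--     column_list = []
--     for letter in cipher_text:
--         column_list.append(letter)
--         if len(column_list) == length_column:
--             decipher_2d_list.append(column_list)
--             column_list = []
--     return decipher_2d_list
-- ===== SOURCE B (Python) =====
-- def apply_decipher_depth_1(cipher_text, length_column):
--     # Chunk the text by slicing whole columns at a time instead of growing a
--     # column letter by letter; the index loop stops before any partial chunk.
--     if length_column <= 0:
--         return []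
--     decipher_2d_list = []
--     i = 0
--     while i + length_column <= len(cipher_text):
--         decipher_2d_list.append(list(cipher_text[i:i + length_column]))
--         i += length_column
--     return decipher_2d_list
-- ===== Notes on version B (the rewrite author's own statement) =====
-- stated objective: alternative
-- what changed: Replaced the letter-by-letter accumulator loop (grow a pending column, flush when full) with an index loop that slices one whole column cipher_text[i:i+length_column] at a time and stops before any trailing partial chunk.
import Mathlib
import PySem

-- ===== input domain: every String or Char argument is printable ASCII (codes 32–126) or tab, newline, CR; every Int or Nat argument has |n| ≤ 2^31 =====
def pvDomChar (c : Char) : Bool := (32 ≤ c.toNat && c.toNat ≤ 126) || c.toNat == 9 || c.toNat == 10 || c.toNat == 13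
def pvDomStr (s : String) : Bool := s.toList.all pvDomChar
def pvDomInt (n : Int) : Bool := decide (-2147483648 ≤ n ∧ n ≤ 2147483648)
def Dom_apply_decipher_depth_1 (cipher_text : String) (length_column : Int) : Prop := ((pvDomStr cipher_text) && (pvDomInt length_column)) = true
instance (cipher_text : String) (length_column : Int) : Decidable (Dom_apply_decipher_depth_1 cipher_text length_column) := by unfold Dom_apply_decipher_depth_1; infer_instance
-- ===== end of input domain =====

-- B replaces A's letter-by-letter accumulator loop with an index loop slicing one
-- whole column at a time; same behaviour, different decomposition, no speed claim.

-- ===== PORT A =====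
-- A: fold over the letters, appending to a pending column and flushing it when its
-- length reaches length_column.
def apply_decipher_depth_1 (cipher_text : String) (length_column : Int) : List (List String) :=
  (cipher_text.toList.foldl
    (fun (st : List (List String) × List String) letter =>
      let column_list := st.2 ++ [String.mk [letter]]
      if (column_list.length : Int) = length_column then (st.1 ++ [column_list], [])
      else (st.1, column_list))
    ([], [])).1

-- ===== PORT B =====
-- B's while loop: slice the next full column cipher_text[i:i+length_column] and
-- advance i by length_column; stops before any trailing partial chunk.
-- (fuel only makes the loop structurally total; s.length + 1 steps always suffice)
def pvChunkLoop (s : List Char) (n : Int) (i : Int) : Nat → List (List String)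
  | 0 => []
  | fuel + 1 =>
    if i + n ≤ (s.length : Int) then
      ((PySem.List.slice s (some i) (some (i + n))).map (fun c => String.mk [c]))
        :: pvChunkLoop s n (i + n) fuel
    else []

def apply_decipher_depth_1_alt (cipher_text : String) (length_column : Int) : List (List String) :=
  if length_column ≤ 0 then []
  else pvChunkLoop cipher_text.toList length_column 0 (cipher_text.toList.length + 1)

-- ===== PRECONDITION & SPEC =====
def Spec_apply_decipher_depth_1 (cipher_text : String) (length_column : Int) (out : List (List String)) : Prop := out = apply_decipher_depth_1_alt cipher_text length_column
instance (cipher_text : String) (length_column : Int) (out : List (List String)) : Decidable (Spec_apply_decipher_depth_1 cipher_text length_column out) := by unfold Spec_apply_decipher_depth_1; infer_instance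

-- ===== CLAIM (what is proved, stated in full; the proofs are below) =====
def Claim_equal_apply_decipher_depth_1 : Prop := ∀ (cipher_text : String) (length_column : Int), Dom_apply_decipher_depth_1 cipher_text length_column → Spec_apply_decipher_depth_1 cipher_text length_column (apply_decipher_depth_1 cipher_text length_column)

-- ===== LEMMAS AND PROOFS =====

-- abbreviation for A's loop body
def pvStepA (n : Int) (st : List (List String) × List String) (letter : Char) :
    List (List String) × List String :=
  let column_list := st.2 ++ [String.mk [letter]]
  if (column_list.length : Int) = n then (st.1 ++ [column_list], [])
  else (st.1, column_list)

-- proof-only middle form: suffix-consuming chunker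
def pvGrouper (length_column : Int) (l : List Char) : List (List String) :=
  if length_column ≤ 0 ∨ (l.length : Int) < length_column then []
  else (l.take length_column.toNat).map (fun c => String.mk [c])
       :: pvGrouper length_column (l.drop length_column.toNat)
termination_by l.length
decreasing_by
  rename_i h
  push_neg at h
  simp only [List.length_drop]
  omega

lemma foldl_stepA (ct : String) (n : Int) :
    apply_decipher_depth_1 ct n = (ct.toList.foldl (pvStepA n) ([], [])).1 := by
  rfl

-- With n ≤ 0 the flush condition can never fire, so the accumulator stays put.
lemma stepA_nonpos (n : Int) (hn : n ≤ 0) :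
    ∀ (l : List Char) (acc : List (List String)) (col : List String),
      (l.foldl (pvStepA n) (acc, col)).1 = acc := by
  intro l
  induction l with
  | nil => intro acc col; rfl
  | cons c l ih =>
    intro acc col
    simp only [List.foldl_cons, pvStepA]
    have : ¬ (((col ++ [String.mk [c]]).length : Int) = n) := by
      simp only [List.length_append, List.length_cons, List.length_nil]
      omega
    simp only [this, if_false]
    exact ih acc (col ++ [String.mk [c]])

-- Main invariant for n > 0: running A's loop with pending partial chunk pref (as
-- singleton strings) computes acc ++ the grouper chunks of pref ++ l.
lemma stepA_pos (n : Int) (hn : 0 < n) :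
    ∀ (l pref : List Char) (acc : List (List String)),
      (pref.length : Int) < n →
      (l.foldl (pvStepA n) (acc, pref.map (fun c => String.mk [c]))).1
        = acc ++ pvGrouper n (pref ++ l) := by
  intro l
  induction l with
  | nil =>
    intro pref acc hpref
    rw [pvGrouper]
    simp only [List.append_nil, List.foldl_nil]
    rw [if_pos (Or.inr hpref)]
    simp
  | cons c l ih =>
    intro pref acc hpref
    simp only [List.foldl_cons, pvStepA]
    have hmap : (pref.map (fun c => String.mk [c])) ++ [String.mk [c]]
        = (pref ++ [c]).map (fun c => String.mk [c]) := by simp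
    by_cases hfull : (((pref.map (fun c => String.mk [c]) ++ [String.mk [c]]).length : Int) = n)
    · simp only [hfull, if_true]
      have hlen : pref.length + 1 = n.toNat := by
        simp only [List.length_append, List.length_map, List.length_cons,
          List.length_nil] at hfull
        omega
      have hstep := ih [] (acc ++ [pref.map (fun c => String.mk [c]) ++ [String.mk [c]]]) (by simpa using hn)
      simp only [List.map_nil, List.nil_append] at hstep
      rw [hstep]
      conv_rhs => rw [pvGrouper]
      have hge : ¬ (n ≤ 0 ∨ (((pref ++ c :: l).length : Int) < n)) := by
        simp only [List.length_append, List.length_cons]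
        omega
      rw [if_neg hge]
      have htake : (pref ++ c :: l).take n.toNat = pref ++ [c] := by
        have : pref ++ c :: l = (pref ++ [c]) ++ l := by simp
        rw [this, List.take_append_of_le_length (by simp; omega)]
        rw [List.take_of_length_le (by simp; omega)]
      have hdrop : (pref ++ c :: l).drop n.toNat = l := by
        have : pref ++ c :: l = (pref ++ [c]) ++ l := by simp
        rw [this, List.drop_append_of_le_length (by simp; omega)]
        rw [List.drop_of_length_le (by simp; omega)]
        simp
      rw [htake, hdrop, hmap]
      simp
    · simp only [hfull, if_false]
      rw [hmap]
      have hlt : ((pref ++ [c]).length : Int) < n := by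
        simp only [List.length_append, List.length_map, List.length_cons,
          List.length_nil] at hfull ⊢
        omega
      rw [ih (pref ++ [c]) acc hlt]
      simp

-- B's index loop at position i computes the grouper chunks of the suffix from i.
lemma chunkLoop_eq_grouper (n : Int) (hn : 0 < n) (s : List Char) :
    ∀ (fuel i : Nat), s.length + 1 - i ≤ fuel →
      pvChunkLoop s n (i : Int) fuel = pvGrouper n (s.drop i) := by
  intro fuel
  induction fuel with
    | zero =>
      intro i hile
      -- i > s.length: suffix is empty and shorter than n
      have hdrop : s.drop i = [] := List.drop_of_length_le (by omega)
      rw [pvChunkLoop,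
          pvGrouper, if_pos (Or.inr (by rw [hdrop]; simpa using hn))]
    | succ m ih =>
      intro i hile
      rw [pvChunkLoop]
      by_cases h : (i : Int) + n ≤ (s.length : Int)
      · rw [if_pos h]
        have hcast : (i : Int) + n = ((i : Nat) : Int) + ((n.toNat : Nat) : Int) := by omega
        rw [hcast, PySem.List.slice_natCast_add]
        have hrec : ((i : Nat) : Int) + ((n.toNat : Nat) : Int) = (((i + n.toNat : Nat)) : Int) := by
          push_cast; ring
        rw [hrec, ih (i + n.toNat) (by omega)]
        conv_rhs => rw [pvGrouper]
        rw [if_neg (by simp only [List.length_drop]; omega)]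
        rw [← List.drop_drop]
      · rw [if_neg h]
        rw [pvGrouper, if_pos]
        right
        simp only [List.length_drop]
        omega

-- ===== VERDICT (by name: the statement is the Claim_ definition above) =====
theorem apply_decipher_depth_1_spec : Claim_equal_apply_decipher_depth_1 := by
  intro ct n _
  unfold Spec_apply_decipher_depth_1 apply_decipher_depth_1_alt
  rw [foldl_stepA]
  by_cases hn : n ≤ 0
  · rw [if_pos hn, stepA_nonpos n hn]
  · rw [if_neg hn]
    push_neg at hn
    have hloop := chunkLoop_eq_grouper n hn ct.toList (ct.toList.length + 1) 0 (by omega)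
    simp only [Nat.cast_zero, List.drop_zero] at hloop
    rw [hloop]
    have h0 : ([] : List Char).map (fun c => String.mk [c]) = [] := rfl
    have := stepA_pos n hn ct.toList [] [] (by simpa using hn)
    rw [h0] at this
    simpa using this
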